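-- pv_equiv track=rewrite | github.com/BerndTheRipper/adventofcode | day3/part2.py | checkNumberFromMid
-- ===== SOURCE A (Python) =====
-- def checkNumber(string:str, startIndex:int, toTheRight:bool)->str:
-- 	checkNumberOutput:str = ""
-- 	direction = -1 + 2*toTheRight
-- 	while startIndex >= 0 and startIndex < len(string) and '0' <= string[startIndex] and string[startIndex] <= '9':
-- 		if direction < 0:
-- 			checkNumberOutput = string[startIndex] + checkNumberOutput
-- 		else:
-- 			checkNumberOutput += string[startIndex]
-- 		startIndex += direction
--
-- 	return checkNumberOutput
--
-- def checkNumberFromMid(string:str, middleIndex:int):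
-- 	output = []
--
-- 	if('0' <= string[middleIndex] and string[middleIndex] <= '9'):
-- 		output.append(string[middleIndex])
-- 		offset = -1
-- 		while 0 <= middleIndex + offset and '0' <= string[middleIndex + offset] and string[middleIndex + offset] <= '9':
-- 			output[0] = string[middleIndex + offset] + output[0]
-- 			offset -= 1
-- 		offset = 1
-- 		while middleIndex + offset < len(string) and '0' <= string[middleIndex + offset] and string[middleIndex + offset] <= '9':
-- 			output[0] += string[middleIndex + offset]
-- 			offset += 1
--
-- 	else:
-- 		leftResult = checkNumber(string, middleIndex - 1, False)
-- 		if leftResult != "": output.append(leftResult)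
--
-- 		rightResult = checkNumber(string, middleIndex + 1, True)
-- 		if rightResult != "": output.append(rightResult)
--
-- 	for i in range(len(output)):
-- 		output[i] = int(output[i])
-- 	return output
-- ===== SOURCE B (Python) =====
-- def checkNumberFromMid(string: str, middleIndex: int):
--     c = string[middleIndex]
--     # one left-to-right scan collecting every maximal digit run as (start, end, value)
--     runs = []
--     cur = ""
--     for k in range(len(string)):
--         ch = string[k]
--         if '0' <= ch <= '9':
--             cur += ch
--         elif cur:
--             runs.append((k - len(cur), k, int(cur)))
--             cur = ""
--     if cur:
--         runs.append((len(string) - len(cur), len(string), int(cur)))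
--     if '0' <= c <= '9':
--         return [v for s, e, v in runs if s <= middleIndex < e]
--     return [v for s, e, v in runs if e == middleIndex or s == middleIndex + 1]
-- ===== Notes on version B (the rewrite author's own statement) =====
-- stated objective: alternative
-- what changed: Replaces A's two-direction character-by-character expansion around middleIndex (three while loops plus a helper) by a single left-to-right scan that collects every maximal digit run as (start, end, value) once, then selects the run containing middleIndex (digit case) or the runs ending at middleIndex / starting at middleIndex+1 (non-digit case).
-- outside the precondition, e.g. on checkNumberFromMid('999', -3): A returns [999999], B returns []; on checkNumberFromMid('2a', -1): A returns [2], B returns [2]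
import Mathlib
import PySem

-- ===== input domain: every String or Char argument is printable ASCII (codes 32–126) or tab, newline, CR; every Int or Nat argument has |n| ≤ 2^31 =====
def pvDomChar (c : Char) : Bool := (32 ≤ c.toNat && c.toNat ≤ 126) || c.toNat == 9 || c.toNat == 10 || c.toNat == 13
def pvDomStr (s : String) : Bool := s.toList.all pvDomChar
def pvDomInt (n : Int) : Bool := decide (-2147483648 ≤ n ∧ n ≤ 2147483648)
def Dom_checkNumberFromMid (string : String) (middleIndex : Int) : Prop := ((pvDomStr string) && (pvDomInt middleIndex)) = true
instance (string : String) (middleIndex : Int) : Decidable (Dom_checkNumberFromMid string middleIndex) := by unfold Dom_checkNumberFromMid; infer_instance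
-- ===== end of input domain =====

-- B replaces A's two-direction expansion around middleIndex by one left-to-right scan collecting
-- every maximal digit run, then selecting the adjacent run(s); same cost, alternative algorithm.

-- ===== PORT A =====
-- '0' <= c and c <= '9'
def pvDig (c : Char) : Bool := decide ('0' ≤ c) && decide (c ≤ '9')

-- int(s) on a nonempty digit string (total form; ofStr? is some on every string it is applied to here)
def pvIntOf (l : List Char) : Int := (PySem.Int.ofStr? (String.ofList l)).getD 0

-- the while loop of checkNumber; fuel bounds the iteration count (≤ len iterations possible)
def pvCheckLoop (cs : List Char) (startIndex dir : Int) (acc : List Char) : Nat → List Char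
  | 0 => acc
  | Nat.succ f =>
    if 0 ≤ startIndex ∧ startIndex < (cs.length : Int) ∧
        pvDig ((PySem.List.pyGet? cs startIndex).getD ' ') = true then
      pvCheckLoop cs (startIndex + dir) dir
        (if dir < 0 then ((PySem.List.pyGet? cs startIndex).getD ' ') :: acc
         else acc ++ [((PySem.List.pyGet? cs startIndex).getD ' ')]) f
    else acc

def pvCheckNumber (string : String) (startIndex : Int) (toTheRight : Bool) : List Char :=
  let cs := string.toList
  pvCheckLoop cs startIndex (-1 + 2 * (if toTheRight then 1 else 0)) [] (2 * cs.length + 2)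

-- first while loop of the digit branch (prepends to output[0])
def pvLeftLoop (cs : List Char) (middleIndex offset : Int) (out0 : List Char) : Nat → List Char
  | 0 => out0
  | Nat.succ f =>
    if 0 ≤ middleIndex + offset ∧
        pvDig ((PySem.List.pyGet? cs (middleIndex + offset)).getD ' ') = true then
      pvLeftLoop cs middleIndex (offset - 1)
        (((PySem.List.pyGet? cs (middleIndex + offset)).getD ' ') :: out0) f
    else out0

-- second while loop of the digit branch (appends to output[0])
def pvRightLoop (cs : List Char) (middleIndex offset : Int) (out0 : List Char) : Nat → List Char
  | 0 => out0
  | Nat.succ f =>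
    if middleIndex + offset < (cs.length : Int) ∧
        pvDig ((PySem.List.pyGet? cs (middleIndex + offset)).getD ' ') = true then
      pvRightLoop cs middleIndex (offset + 1)
        (out0 ++ [((PySem.List.pyGet? cs (middleIndex + offset)).getD ' ')]) f
    else out0

def checkNumberFromMid (string : String) (middleIndex : Int) : List Int :=
  let cs := string.toList
  match PySem.List.pyGet? cs middleIndex with
  | none => []   -- Python raises IndexError here; excluded by Pre_
  | some c0 =>
    let output : List (List Char) :=
      if pvDig c0 = true then
        [pvRightLoop cs middleIndex 1
          (pvLeftLoop cs middleIndex (-1) [c0] (2 * cs.length + 2)) (2 * cs.length + 2)]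
      else
        let leftResult := pvCheckNumber string (middleIndex - 1) false
        let out1 : List (List Char) := if leftResult ≠ [] then [leftResult] else []
        let rightResult := pvCheckNumber string (middleIndex + 1) true
        if rightResult ≠ [] then out1 ++ [rightResult] else out1
    output.map pvIntOf

-- ===== PORT B =====
-- the scan of Source B: for k in range(len(string)) collecting maximal digit runs, plus the final flush
def pvScanGo (cs : List Char) (k : Nat) (runs : List (Int × Int × Int)) (cur : List Char) :
    List (Int × Int × Int) :=
  match cs with
  | [] => if cur = [] then runs else runs ++ [((k : Int) - cur.length, (k : Int), pvIntOf cur)]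
  | ch :: t =>
    if pvDig ch = true then pvScanGo t (k + 1) runs (cur ++ [ch])
    else if cur = [] then pvScanGo t (k + 1) runs []
    else pvScanGo t (k + 1) (runs ++ [((k : Int) - cur.length, (k : Int), pvIntOf cur)]) []

def checkNumberFromMid_alt (string : String) (middleIndex : Int) : List Int :=
  let cs := string.toList
  match PySem.List.pyGet? cs middleIndex with
  | none => []   -- Python raises IndexError here; excluded by Pre_
  | some c =>
    let runs := pvScanGo cs 0 [] []
    if pvDig c = true then
      runs.filterMap (fun r => if r.1 ≤ middleIndex ∧ middleIndex < r.2.1 then some r.2.2 else none)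
    else
      runs.filterMap (fun r => if r.2.1 = middleIndex ∨ r.1 = middleIndex + 1 then some r.2.2 else none)

-- ===== PRECONDITION & SPEC =====
-- Pre_ excludes out-of-range middleIndex, where A raises IndexError, and negative in-range
-- middleIndex, where A mixes Python's from-end character access with from-start loop bounds so its
-- value on that corner is accidental (e.g. ("999", -3)); the natural domain is 0 ≤ middleIndex < len.
def Pre_checkNumberFromMid (string : String) (middleIndex : Int) : Prop :=
  0 ≤ middleIndex ∧ middleIndex < (string.toList.length : Int)
instance (string : String) (middleIndex : Int) : Decidable (Pre_checkNumberFromMid string middleIndex) := by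
  unfold Pre_checkNumberFromMid; infer_instance

def pvWitness_checkNumberFromMid : String × Int := ("12a34", 1)

def Spec_checkNumberFromMid (string : String) (middleIndex : Int) (out : List Int) : Prop := out = checkNumberFromMid_alt string middleIndex
instance (string : String) (middleIndex : Int) (out : List Int) : Decidable (Spec_checkNumberFromMid string middleIndex out) := by unfold Spec_checkNumberFromMid; infer_instance

-- ===== CLAIM (what is proved, stated in full; the proofs are below) =====
def Claim_equal_checkNumberFromMid : Prop := ∀ (string : String) (middleIndex : Int), Dom_checkNumberFromMid string middleIndex → Pre_checkNumberFromMid string middleIndex → Spec_checkNumberFromMid string middleIndex (checkNumberFromMid string middleIndex)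

-- ===== LEMMAS AND PROOFS =====

def pvLeftOf (cs : List Char) (m : Nat) : List Char :=
  (((cs.take m).reverse).takeWhile pvDig).reverse
def pvRightOf (cs : List Char) (m : Nat) : List Char :=
  (cs.drop (m + 1)).takeWhile pvDig

-- reference form of the run list the scan produces
def pvRunsSpec : List Char → Nat → List (Int × Int × Int)
  | [], _ => []
  | ch :: t, k =>
    if pvDig ch = true then
      ((k : Int), (k : Int) + 1 + ((t.takeWhile pvDig).length : Int),
        pvIntOf (ch :: t.takeWhile pvDig)) ::
        pvRunsSpec (t.dropWhile pvDig) (k + 1 + (t.takeWhile pvDig).length)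
    else pvRunsSpec t (k + 1)
  termination_by cs => cs.length
  decreasing_by
    · have := List.length_dropWhile_le pvDig t; simp; omega
    · simp


theorem pvScanGo_eq (cs : List Char) : ∀ (k : Nat) (runs : List (Int × Int × Int)) (cur : List Char),
    pvScanGo cs k runs cur = runs ++
      (if cur = [] then pvRunsSpec cs k
       else ((k : Int) - cur.length, (k : Int) + ((cs.takeWhile pvDig).length : Int),
             pvIntOf (cur ++ cs.takeWhile pvDig)) ::
            pvRunsSpec (cs.dropWhile pvDig) (k + (cs.takeWhile pvDig).length)) := by
  induction cs with
  | nil =>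
    intro k runs cur
    by_cases h : cur = [] <;> simp [pvScanGo, pvRunsSpec, h]
  | cons ch t ih =>
    intro k runs cur
    by_cases hd : pvDig ch = true
    · rw [pvScanGo, if_pos hd, ih, if_neg (by simp : ¬(cur ++ [ch] = []))]
      by_cases h : cur = []
      · subst h
        rw [if_pos rfl, pvRunsSpec, if_pos hd]
        simp only [List.takeWhile_cons, List.dropWhile_cons, hd, if_pos rfl, List.nil_append,
          List.length_nil, List.length_append, List.length_cons, List.length_singleton]
        congr 2
        refine congrArg₂ Prod.mk ?_ (congrArg₂ Prod.mk ?_ rfl)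
        · push_cast; omega
        · push_cast; omega
      · rw [if_neg h]
        simp only [List.takeWhile_cons, List.dropWhile_cons, hd, if_pos rfl,
          List.length_append, List.length_cons, List.length_singleton, List.length_nil]
        rw [show k + 1 + (List.takeWhile pvDig t).length
              = k + ((List.takeWhile pvDig t).length + 1) by omega]
        congr 2
        refine congrArg₂ Prod.mk ?_ (congrArg₂ Prod.mk ?_ ?_)
        · push_cast; omega
        · show (((k:Nat) + 1 : Int)) + ((List.takeWhile pvDig t).length : Int)
              = (k : Int) + (((ch :: List.takeWhile pvDig t).length : Nat) : Int)
          rw [List.length_cons]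
          push_cast; omega
        · rw [List.append_assoc]; rfl
    · rw [pvScanGo, if_neg hd]
      by_cases h : cur = []
      · subst h
        rw [if_pos rfl, ih, if_pos rfl, pvRunsSpec, if_neg hd]
        rfl
      · rw [if_neg h, ih, if_pos rfl]
        simp only [List.takeWhile_cons, List.dropWhile_cons, hd, if_neg, Bool.false_eq_true,
          if_false, List.length_nil, List.append_nil, Nat.add_zero, Nat.cast_ofNat]
        rw [pvRunsSpec, if_neg hd]
        simp [h]

theorem pvLow1 (cs : List Char) (k : Nat) : ∀ (j : Int), j < (k : Int) →
    (pvRunsSpec cs k).filterMap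
      (fun r => if r.1 ≤ j ∧ j < r.2.1 then some r.2.2 else none) = [] := by
  induction cs, k using pvRunsSpec.induct with
  | case1 k => intro j h; simp [pvRunsSpec]
  | case2 k ch t hd ih =>
    intro j h
    rw [pvRunsSpec, if_pos hd, List.filterMap_cons]
    rw [if_neg (by push_neg; intro h1; omega)]
    exact ih j (by push_cast; omega)
  | case3 k ch t hd ih =>
    intro j h
    rw [pvRunsSpec, if_neg hd]
    exact ih j (by push_cast; omega)

theorem pvLow2 (cs : List Char) (k : Nat) : ∀ (j : Int), j + 1 < (k : Int) →
    (pvRunsSpec cs k).filterMap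
      (fun r => if r.2.1 = j ∨ r.1 = j + 1 then some r.2.2 else none) = [] := by
  induction cs, k using pvRunsSpec.induct with
  | case1 k => intro j h; simp [pvRunsSpec]
  | case2 k ch t hd ih =>
    intro j h
    rw [pvRunsSpec, if_pos hd, List.filterMap_cons]
    rw [if_neg (by push_neg; refine ⟨by push_cast; omega, by push_cast; omega⟩)]
    exact ih j (by push_cast; omega)
  | case3 k ch t hd ih =>
    intro j h
    rw [pvRunsSpec, if_neg hd]
    exact ih j (by push_cast; omega)

theorem pvHeadSel (cs : List Char) (k : Nat) (j : Int) (hj : j + 1 = (k : Int)) :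
    (pvRunsSpec cs k).filterMap
      (fun r => if r.2.1 = j ∨ r.1 = j + 1 then some r.2.2 else none) =
    if cs.takeWhile pvDig = [] then [] else [pvIntOf (cs.takeWhile pvDig)] := by
  match cs with
  | [] => simp [pvRunsSpec]
  | ch :: t =>
    by_cases hd : pvDig ch = true
    · rw [pvRunsSpec, if_pos hd, List.filterMap_cons, if_pos (Or.inr hj.symm)]
      rw [pvLow2 _ _ j (by push_cast; omega)]
      simp [List.takeWhile_cons, hd]
    · rw [pvRunsSpec, if_neg hd, pvLow2 _ _ j (by push_cast; omega)]
      simp [List.takeWhile_cons, hd]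

theorem pvLeftOf_succ_dig (cs : List Char) (m : Nat) (hm : m < cs.length)
    (hd : pvDig cs[m] = true) : pvLeftOf cs (m + 1) = pvLeftOf cs m ++ [cs[m]] := by
  unfold pvLeftOf
  rw [List.take_add_one, List.getElem?_eq_getElem hm]
  rw [show (some cs[m]).toList = [cs[m]] from rfl]
  rw [List.reverse_append, List.reverse_singleton]
  rw [show [cs[m]] ++ (List.take m cs).reverse = cs[m] :: (List.take m cs).reverse from rfl]
  rw [List.takeWhile_cons, if_pos hd]
  simp

theorem pvLeftOf_succ_non (cs : List Char) (m : Nat) (hm : m < cs.length)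
    (hd : pvDig cs[m] = false) : pvLeftOf cs (m + 1) = [] := by
  unfold pvLeftOf
  rw [List.take_add_one, List.getElem?_eq_getElem hm]
  rw [show (some cs[m]).toList = [cs[m]] from rfl]
  rw [List.reverse_append, List.reverse_singleton]
  rw [show [cs[m]] ++ (List.take m cs).reverse = cs[m] :: (List.take m cs).reverse from rfl]
  rw [List.takeWhile_cons, if_neg (by simp [hd])]
  rfl

theorem pvLeftOf_zero (cs : List Char) : pvLeftOf cs 0 = [] := by simp [pvLeftOf]

theorem pvLeftLoop_eq (cs : List Char) : ∀ (f : Nat) (mi offset : Int) (acc : List Char) (p : Nat),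
    mi + offset = (p : Int) - 1 → p ≤ cs.length → p < f →
    pvLeftLoop cs mi offset acc f = pvLeftOf cs p ++ acc := by
  intro f
  induction f with
  | zero => intro mi offset acc p h hp hf; omega
  | succ f ih =>
    intro mi offset acc p h hp hf
    rw [pvLeftLoop]
    match p, h with
    | 0, h =>
      rw [if_neg (by rw [h]; push_neg; intro h1; omega), pvLeftOf_zero, List.nil_append]
    | Nat.succ q, h =>
      have hq : q < cs.length := by omega
      have hidx : mi + offset = (q : Int) := by push_cast at h ⊢; omega
      rw [hidx, PySem.List.pyGet?_natCast, List.getElem?_eq_getElem hq, Option.getD_some]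
      by_cases hdg : pvDig cs[q] = true
      · rw [if_pos ⟨by omega, hdg⟩]
        rw [ih mi (offset - 1) _ q (by omega) (by omega) (by omega)]
        rw [pvLeftOf_succ_dig cs q hq hdg]
        simp
      · rw [if_neg (by push_neg; intro _; exact hdg), pvLeftOf_succ_non cs q hq (by simpa using hdg)]
        simp

theorem pvRightLoop_eq (cs : List Char) : ∀ (f : Nat) (mi offset : Int) (acc : List Char),
    0 ≤ mi + offset → (cs.length : Int) ≤ mi + offset + f →
    pvRightLoop cs mi offset acc f = acc ++ (cs.drop (mi + offset).toNat).takeWhile pvDig := by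
  intro f
  induction f with
  | zero =>
    intro mi offset acc h0 hf
    rw [pvRightLoop, List.drop_of_length_le (by omega : cs.length ≤ (mi + offset).toNat)]
    simp
  | succ f ih =>
    intro mi offset acc h0 hf
    rw [pvRightLoop]
    obtain ⟨q, hq⟩ : ∃ q : Nat, mi + offset = (q : Int) := ⟨(mi + offset).toNat, by omega⟩
    by_cases hin : q < cs.length
    · rw [hq, PySem.List.pyGet?_natCast, List.getElem?_eq_getElem hin, Option.getD_some]
      simp only [Int.toNat_natCast]
      rw [List.drop_eq_getElem_cons hin, List.takeWhile_cons]
      by_cases hdg : pvDig cs[q] = true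
      · rw [if_pos ⟨by push_cast; omega, hdg⟩, if_pos hdg]
        rw [ih mi (offset + 1) _ (by omega) (by push_cast; push_cast at hf; omega)]
        rw [show mi + (offset + 1) = ((q + 1 : Nat) : Int) by push_cast; omega]
        simp
      · rw [if_neg (by push_neg; intro _; exact hdg), if_neg (by simpa using hdg)]
        simp
    · rw [if_neg (by push_neg; intro h1; omega)]
      rw [List.drop_of_length_le (by omega : cs.length ≤ (mi + offset).toNat)]
      simp

theorem pvCheckLoopL_eq (cs : List Char) : ∀ (f : Nat) (start : Int) (acc : List Char) (p : Nat),
    start = (p : Int) - 1 → p ≤ cs.length → p < f →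
    pvCheckLoop cs start (-1) acc f = pvLeftOf cs p ++ acc := by
  intro f
  induction f with
  | zero => intro start acc p h hp hf; omega
  | succ f ih =>
    intro start acc p h hp hf
    rw [pvCheckLoop]
    match p, h with
    | 0, h =>
      rw [if_neg (by rw [h]; push_neg; intro h1; omega), pvLeftOf_zero, List.nil_append]
    | Nat.succ q, h =>
      have hq : q < cs.length := by omega
      have hidx : start = (q : Int) := by push_cast at h ⊢; omega
      rw [hidx, PySem.List.pyGet?_natCast, List.getElem?_eq_getElem hq, Option.getD_some]
      by_cases hdg : pvDig cs[q] = true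
      · rw [if_pos ⟨by omega, by push_cast; omega, hdg⟩, if_pos (by norm_num : (-1 : Int) < 0)]
        rw [ih ((q : Int) + -1) _ q (by omega) (by omega) (by omega)]
        rw [pvLeftOf_succ_dig cs q hq hdg]
        simp
      · rw [if_neg (by push_neg; intro _ _; exact hdg), pvLeftOf_succ_non cs q hq (by simpa using hdg)]
        simp

theorem pvCheckLoopR_eq (cs : List Char) : ∀ (f : Nat) (start : Int) (acc : List Char),
    0 ≤ start → (cs.length : Int) ≤ start + f →
    pvCheckLoop cs start 1 acc f = acc ++ (cs.drop start.toNat).takeWhile pvDig := by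
  intro f
  induction f with
  | zero =>
    intro start acc h0 hf
    rw [pvCheckLoop, List.drop_of_length_le (by omega : cs.length ≤ start.toNat)]
    simp
  | succ f ih =>
    intro start acc h0 hf
    rw [pvCheckLoop]
    obtain ⟨q, hq⟩ : ∃ q : Nat, start = (q : Int) := ⟨start.toNat, by omega⟩
    by_cases hin : q < cs.length
    · rw [hq, PySem.List.pyGet?_natCast, List.getElem?_eq_getElem hin, Option.getD_some]
      simp only [Int.toNat_natCast]
      rw [List.drop_eq_getElem_cons hin, List.takeWhile_cons]
      by_cases hdg : pvDig cs[q] = true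
      · rw [if_pos ⟨by omega, by push_cast; omega, hdg⟩, if_neg (by norm_num : ¬((1 : Int) < 0)),
          if_pos hdg]
        rw [ih ((q : Int) + 1) _ (by omega) (by push_cast; push_cast at hf; omega)]
        rw [show ((q : Int) + 1) = ((q + 1 : Nat) : Int) by push_cast; omega]
        simp
      · rw [if_neg (by push_neg; intro _ _; exact hdg), if_neg (by simpa using hdg)]
        simp
    · rw [if_neg (by push_neg; intro h1; omega)]
      rw [List.drop_of_length_le (by omega : cs.length ≤ start.toNat)]
      simp

theorem pvTW_all {l1 l2 : List Char} (h : ∀ x ∈ l1, pvDig x = true) :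
    (l1 ++ l2).takeWhile pvDig = l1 ++ l2.takeWhile pvDig := by
  rw [List.takeWhile_append, if_pos (by rw [List.takeWhile_eq_self_iff.mpr h])]

theorem pvTW_stop {l1 l2 : List Char} (x : Char) (hx : x ∈ l1) (hd : pvDig x = false) :
    (l1 ++ l2).takeWhile pvDig = l1.takeWhile pvDig := by
  rw [List.takeWhile_append, if_neg]
  intro hlen
  have heq : l1.takeWhile pvDig = l1 :=
    (List.takeWhile_prefix pvDig).eq_of_length hlen
  have := List.takeWhile_eq_self_iff.mp heq x hx
  simp [hd] at this

theorem pvLeftOf_all (cs : List Char) (m : Nat) (h : ∀ x ∈ cs.take m, pvDig x = true) :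
    pvLeftOf cs m = cs.take m := by
  unfold pvLeftOf
  rw [List.takeWhile_eq_self_iff.mpr (fun x hx => h x (List.mem_reverse.mp hx))]
  simp

theorem pvLeftOf_append (P dw : List Char) (m : Nat) (h1 : 1 ≤ m) (hm : m ≤ dw.length)
    (hd : pvDig (dw[0]'(by omega)) = false) :
    pvLeftOf (P ++ dw) (P.length + m) = pvLeftOf dw m := by
  unfold pvLeftOf
  rw [List.take_length_add_append, List.reverse_append]
  rw [pvTW_stop (dw[0]'(by omega)) ?_ hd]
  exact List.mem_reverse.mpr (by
    have h0 : 0 < (List.take m dw).length := by simp; omega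
    have he : (List.take m dw)[0]'h0 = dw[0]'(by omega) := List.getElem_take
    exact he ▸ List.getElem_mem h0)

theorem pvLeftOf_cons (ch : Char) (t : List Char) (m : Nat) (hd : pvDig ch = false) :
    pvLeftOf (ch :: t) (m + 1) = pvLeftOf t m := by
  unfold pvLeftOf
  rw [show List.take (m + 1) (ch :: t) = [ch] ++ List.take m t from rfl, List.reverse_append,
    List.takeWhile_append]
  split_ifs with h
  · have heq := (List.takeWhile_prefix (l := (List.take m t).reverse) pvDig).eq_of_length h
    simp [List.takeWhile_cons, hd, heq]
  · rfl

theorem pvRightOf_append (P dw : List Char) (m : Nat) :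
    pvRightOf (P ++ dw) (P.length + m) = pvRightOf dw m := by
  unfold pvRightOf
  rw [show P.length + m + 1 = P.length + (m + 1) by omega, List.drop_length_add_append]

theorem pvRightOf_cons (ch : Char) (t : List Char) (m : Nat) :
    pvRightOf (ch :: t) (m + 1) = pvRightOf t m := rfl

theorem pvTW_dw (l : List Char) : (l.dropWhile pvDig).takeWhile pvDig = [] := by
  cases h : l.dropWhile pvDig with
  | nil => rfl
  | cons d t' =>
    have hne : l.dropWhile pvDig ≠ [] := by rw [h]; simp
    have hd := List.head_dropWhile_not pvDig hne
    simp only [h, List.head_cons] at hd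
    rw [List.takeWhile_cons, if_neg (by simp [hd])]

theorem pvSelDig (cs : List Char) (k : Nat) : ∀ (m : Nat) (j : Int), j = (k : Int) + m →
    ∀ (hm : m < cs.length), pvDig cs[m] = true →
    (pvRunsSpec cs k).filterMap
      (fun r => if r.1 ≤ j ∧ j < r.2.1 then some r.2.2 else none) =
    [pvIntOf (pvLeftOf cs m ++ cs[m] :: pvRightOf cs m)] := by
  induction cs, k using pvRunsSpec.induct with
  | case1 k => intro m j hj hm hdig; exact absurd hm (by simp)
  | case2 ch t k hd ih =>
    intro m j hj hm hdig
    have hsplit : ch :: t = (ch :: t.takeWhile pvDig) ++ t.dropWhile pvDig := by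
      simp [List.takeWhile_append_dropWhile]
    have hlen : (t.takeWhile pvDig).length + (t.dropWhile pvDig).length = t.length := by
      rw [← List.length_append, List.takeWhile_append_dropWhile]
    have hlen2 : (ch :: t).length = t.length + 1 := by simp
    have hPall : ∀ x ∈ ch :: t.takeWhile pvDig, pvDig x = true := by
      intro x hx
      rcases List.mem_cons.mp hx with h | h
      · exact h ▸ hd
      · exact List.mem_takeWhile_imp h
    rw [pvRunsSpec, if_pos hd, List.filterMap_cons]
    by_cases hcase : m < (t.takeWhile pvDig).length + 1
    · rw [if_pos (by constructor <;> (push_cast; omega))]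
      rw [pvLow1 _ _ j (by push_cast; omega)]
      have hmP : m < (ch :: t.takeWhile pvDig).length := by simp; omega
      have hbody : ch :: t.takeWhile pvDig =
          pvLeftOf (ch :: t) m ++ (ch :: t)[m] :: pvRightOf (ch :: t) m := by
        have htake : (ch :: t).take m = (ch :: t.takeWhile pvDig).take m := by
          conv_lhs => rw [hsplit]
          exact List.take_append_of_le_length (by simp; omega)
        have hgetm : (ch :: t)[m] = (ch :: t.takeWhile pvDig)[m]'hmP :=
          (List.getElem_of_eq hsplit hm).trans (List.getElem_append_left hmP)
        have hleft : pvLeftOf (ch :: t) m = (ch :: t.takeWhile pvDig).take m := by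
          rw [pvLeftOf_all _ _ (by
            intro x hx
            rw [htake] at hx
            exact hPall x (List.mem_of_mem_take hx))]
          exact htake
        have hright : pvRightOf (ch :: t) m = (ch :: t.takeWhile pvDig).drop (m + 1) := by
          unfold pvRightOf
          conv_lhs => rw [hsplit]
          rw [List.drop_append_of_le_length (by simp; omega)]
          rw [pvTW_all (fun x hx => hPall x (List.mem_of_mem_drop hx)), pvTW_dw, List.append_nil]
        rw [hleft, hright, hgetm, ← List.drop_eq_getElem_cons hmP, List.take_append_drop]
      rw [← hbody]
    · rw [if_neg (by push_neg; intro; push_cast; omega)]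
      have hm' : m - ((t.takeWhile pvDig).length + 1) < (t.dropWhile pvDig).length := by omega
      have hget : (ch :: t)[m]
          = (t.dropWhile pvDig)[m - ((t.takeWhile pvDig).length + 1)]'hm' := by
        refine (List.getElem_of_eq hsplit hm).trans ?_
        rw [List.getElem_append_right (by simp; omega)]
        simp
      have hdw0 : pvDig ((t.dropWhile pvDig)[0]'(by omega)) = false := by
        have hne : t.dropWhile pvDig ≠ [] := by
          intro h; rw [h] at hm'; simp at hm'
        have := List.head_dropWhile_not pvDig hne
        rwa [List.head_eq_getElem] at this
      have hm1 : 1 ≤ m - ((t.takeWhile pvDig).length + 1) := by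
        by_contra h0
        have h00 : m - ((t.takeWhile pvDig).length + 1) = 0 := by omega
        have hdig' := hget ▸ hdig
        simp only [h00] at hdig'
        simp [hdig'] at hdw0
      rw [ih (m - ((t.takeWhile pvDig).length + 1)) j (by push_cast; omega) hm' (hget ▸ hdig)]
      have harg : m = (ch :: t.takeWhile pvDig).length + (m - ((t.takeWhile pvDig).length + 1)) := by
        simp; omega
      have hleft : pvLeftOf (ch :: t) m
          = pvLeftOf (t.dropWhile pvDig) (m - ((t.takeWhile pvDig).length + 1)) := by
        conv_lhs => rw [hsplit, harg]
        exact pvLeftOf_append _ _ _ hm1 (by omega) hdw0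
      have hright : pvRightOf (ch :: t) m
          = pvRightOf (t.dropWhile pvDig) (m - ((t.takeWhile pvDig).length + 1)) := by
        conv_lhs => rw [hsplit, harg]
        exact pvRightOf_append _ _ _
      rw [hleft, hright, hget]
  | case3 ch t k hd ih =>
    intro m j hj hm hdig
    have hchF : pvDig ch = false := by simpa using hd
    match m with
    | 0 => rw [List.getElem_cons_zero] at hdig; rw [hdig] at hchF; simp at hchF
    | Nat.succ m' =>
      rw [pvRunsSpec, if_neg hd]
      rw [ih m' j (by push_cast; omega) (by simpa using hm) (by simpa using hdig)]
      rw [pvLeftOf_cons ch t m' hchF, pvRightOf_cons, List.getElem_cons_succ]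

theorem pvSelNonDig (cs : List Char) (k : Nat) : ∀ (m : Nat) (j : Int), j = (k : Int) + m →
    ∀ (hm : m < cs.length), pvDig cs[m] = false →
    (pvRunsSpec cs k).filterMap
      (fun r => if r.2.1 = j ∨ r.1 = j + 1 then some r.2.2 else none) =
    (if pvLeftOf cs m = [] then [] else [pvIntOf (pvLeftOf cs m)]) ++
    (if pvRightOf cs m = [] then [] else [pvIntOf (pvRightOf cs m)]) := by
  induction cs, k using pvRunsSpec.induct with
  | case1 k => intro m j hj hm hdig; exact absurd hm (by simp)
  | case2 ch t k hd ih =>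
    intro m j hj hm hdig
    have hsplit : ch :: t = (ch :: t.takeWhile pvDig) ++ t.dropWhile pvDig := by
      simp [List.takeWhile_append_dropWhile]
    have hlen : (t.takeWhile pvDig).length + (t.dropWhile pvDig).length = t.length := by
      rw [← List.length_append, List.takeWhile_append_dropWhile]
    have hPall : ∀ x ∈ ch :: t.takeWhile pvDig, pvDig x = true := by
      intro x hx
      rcases List.mem_cons.mp hx with h | h
      · exact h ▸ hd
      · exact List.mem_takeWhile_imp h
    have hge : (t.takeWhile pvDig).length + 1 ≤ m := by
      by_contra h0
      have hmP : m < (ch :: t.takeWhile pvDig).length := by simp; omega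
      have hgetm : (ch :: t)[m] = (ch :: t.takeWhile pvDig)[m]'hmP :=
        (List.getElem_of_eq hsplit hm).trans (List.getElem_append_left hmP)
      have := hPall _ (List.getElem_mem hmP)
      rw [hgetm] at hdig
      rw [this] at hdig
      simp at hdig
    rw [pvRunsSpec, if_pos hd, List.filterMap_cons]
    by_cases hcase : m = (t.takeWhile pvDig).length + 1
    · rw [if_pos (Or.inl (by push_cast; omega))]
      -- the run immediately left of m is (ch :: takeWhile t); selected by e = j
      have hm2 : m < t.length + 1 := by simpa using hm
      have hmdw : 0 < (t.dropWhile pvDig).length := by omega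
      obtain ⟨d, t2, hdw⟩ : ∃ d t2, t.dropWhile pvDig = d :: t2 := by
        cases h : t.dropWhile pvDig with
        | nil => rw [h] at hmdw; simp at hmdw
        | cons d t2 => exact ⟨d, t2, rfl⟩
      have hdF : pvDig d = false := by
        have hne : t.dropWhile pvDig ≠ [] := by rw [hdw]; simp
        have := List.head_dropWhile_not pvDig hne
        rw [List.head_eq_getElem] at this
        simpa [hdw] using this
      rw [hdw, pvRunsSpec, if_neg (by simp [hdF])]
      rw [pvHeadSel t2 (k + 1 + (t.takeWhile pvDig).length + 1) j (by push_cast; omega)]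
      have hleft : pvLeftOf (ch :: t) m = ch :: t.takeWhile pvDig := by
        have htake : (ch :: t).take m = ch :: t.takeWhile pvDig := by
          conv_lhs => rw [hsplit]
          rw [List.take_append_of_le_length (by simp; omega)]
          exact List.take_of_length_le (by simp; omega)
        rw [pvLeftOf_all _ _ (by
          intro x hx
          rw [htake] at hx
          exact hPall x hx)]
        exact htake
      have hright : pvRightOf (ch :: t) m = t2.takeWhile pvDig := by
        unfold pvRightOf
        conv_lhs => rw [hsplit, hdw]
        rw [show m + 1 = (ch :: t.takeWhile pvDig).length + 1 by simp; omega]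
        rw [show (ch :: t.takeWhile pvDig).length + 1
              = (ch :: t.takeWhile pvDig).length + (0 + 1) by omega]
        rw [List.drop_length_add_append]
        simp
      rw [hleft, hright]
      rw [if_neg (show ¬(ch :: t.takeWhile pvDig = []) by simp)]
      rfl
    · rw [if_neg (by push_neg; refine ⟨by push_cast; omega, by push_cast; omega⟩)]
      have hm' : m - ((t.takeWhile pvDig).length + 1) < (t.dropWhile pvDig).length := by
        simp at hm; omega
      have hget : (ch :: t)[m]
          = (t.dropWhile pvDig)[m - ((t.takeWhile pvDig).length + 1)]'hm' := by
        refine (List.getElem_of_eq hsplit hm).trans ?_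
        rw [List.getElem_append_right (by simp; omega)]
        simp
      have hdw0 : pvDig ((t.dropWhile pvDig)[0]'(by omega)) = false := by
        have hne : t.dropWhile pvDig ≠ [] := by
          intro h; rw [h] at hm'; simp at hm'
        have := List.head_dropWhile_not pvDig hne
        rwa [List.head_eq_getElem] at this
      have hm1 : 1 ≤ m - ((t.takeWhile pvDig).length + 1) := by omega
      rw [ih (m - ((t.takeWhile pvDig).length + 1)) j (by push_cast; omega) hm' (hget ▸ hdig)]
      have harg : m = (ch :: t.takeWhile pvDig).length + (m - ((t.takeWhile pvDig).length + 1)) := by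
        simp; omega
      have hleft : pvLeftOf (ch :: t) m
          = pvLeftOf (t.dropWhile pvDig) (m - ((t.takeWhile pvDig).length + 1)) := by
        conv_lhs => rw [hsplit, harg]
        exact pvLeftOf_append _ _ _ hm1 (by omega) hdw0
      have hright : pvRightOf (ch :: t) m
          = pvRightOf (t.dropWhile pvDig) (m - ((t.takeWhile pvDig).length + 1)) := by
        conv_lhs => rw [hsplit, harg]
        exact pvRightOf_append _ _ _
      rw [hleft, hright]
  | case3 ch t k hd ih =>
    intro m j hj hm hdig
    match m with
    | 0 =>
      rw [pvRunsSpec, if_neg hd]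
      rw [pvHeadSel t (k + 1) j (by push_cast; omega)]
      rw [show pvLeftOf (ch :: t) 0 = [] from pvLeftOf_zero _]
      rw [show pvRightOf (ch :: t) 0 = t.takeWhile pvDig from rfl]
      simp
    | Nat.succ m' =>
      rw [pvRunsSpec, if_neg hd]
      have hchF : pvDig ch = false := by simpa using hd
      rw [ih m' j (by push_cast; omega) (by simpa using hm) (by simpa using hdig)]
      rw [pvLeftOf_cons ch t m' hchF, pvRightOf_cons]

theorem pvMain_eq (string : String) (mi : Int) (h0 : 0 ≤ mi)
    (h1 : mi < (string.toList.length : Int)) :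
    checkNumberFromMid string mi = checkNumberFromMid_alt string mi := by
  obtain ⟨m, rfl⟩ : ∃ m : Nat, mi = (m : Int) := ⟨mi.toNat, (Int.toNat_of_nonneg h0).symm⟩
  have hm : m < string.toList.length := by exact_mod_cast h1
  unfold checkNumberFromMid checkNumberFromMid_alt pvCheckNumber
  simp only [PySem.List.pyGet?_natCast, List.getElem?_eq_getElem hm]
  rw [pvScanGo_eq _ 0 [] [], if_pos rfl, List.nil_append]
  by_cases hd : pvDig (string.toList[m]'hm) = true
  · rw [if_pos hd, if_pos hd]
    rw [pvLeftLoop_eq _ _ _ _ _ m (by push_cast; ring) (le_of_lt hm) (by omega)]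
    rw [pvRightLoop_eq _ _ _ _ _ (by omega) (by push_cast; omega)]
    rw [pvSelDig _ 0 m (m : Int) (by omega) hm hd]
    rw [show ((m : Int) + 1) = ((m + 1 : Nat) : Int) by push_cast; ring, Int.toNat_natCast]
    simp [pvRightOf]
  · rw [if_neg hd, if_neg hd]
    have hdF : pvDig (string.toList[m]'hm) = false := by simpa using hd
    rw [pvSelNonDig _ 0 m (m : Int) (by push_cast; omega) hm hdF]
    rw [show (-1 + 2 * (if false = true then (1:Int) else 0)) = -1 by norm_num]
    rw [show (-1 + 2 * (if True then (1:Int) else 0)) = 1 by norm_num]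
    rw [pvCheckLoopL_eq _ _ _ _ m (by norm_num) (le_of_lt hm) (by omega)]
    rw [pvCheckLoopR_eq _ _ _ _ (by omega) (by push_cast; omega)]
    rw [show ((m : Int) + 1) = ((m + 1 : Nat) : Int) by push_cast; ring, Int.toNat_natCast]
    rw [show List.takeWhile pvDig (List.drop (m + 1) string.toList)
          = pvRightOf string.toList m from rfl]
    by_cases hL : pvLeftOf string.toList m = [] <;>
      by_cases hR : pvRightOf string.toList m = [] <;>
        simp [hL, hR]

-- ===== VERDICT (by name: the statement is the Claim_ definition above) =====
theorem checkNumberFromMid_spec : Claim_equal_checkNumberFromMid := by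
  intro s mi _ hpre
  exact pvMain_eq s mi hpre.1 hpre.2
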